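-- pv_equiv track=rewrite | github.com/tbailey6133/word_wizard | Controllers/WordManager.py | build_word_matrix_hints
-- ===== SOURCE A (Python) =====
-- def build_word_matrix_hints(grouped_words):
--
--     matrix = {}
--
--     for item in grouped_words:
--         words_arr = grouped_words[item]
--         for word in words_arr:
--             prefix = word["word"][:2].upper()
--             matrix[prefix] = matrix.get(prefix, 0) + 1
--
--     matrix = dict(sorted(matrix.items()))
--
--     return matrix
-- ===== SOURCE B (Python) =====
-- from itertools import groupby
--
--
-- def build_word_matrix_hints(grouped_words):
--     # Flatten every word into its uppercased 2-letter prefix, sort the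
--     # flat list, then count each run of equal prefixes with groupby.
--     prefixes = [w["word"][:2].upper()
--                 for words in grouped_words.values()
--                 for w in words]
--     prefixes.sort()
--     return {k: sum(1 for _ in g) for k, g in groupby(prefixes)}
-- ===== Notes on version B (the rewrite author's own statement) =====
-- stated objective: alternative
-- what changed: A increments a hash-map counter per word and sorts the map's items at the end; B flattens all words into one list of uppercased 2-letter prefixes, sorts that flat list, and counts runs of equal prefixes with itertools.groupby (no counting dict).
import Mathlib
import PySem

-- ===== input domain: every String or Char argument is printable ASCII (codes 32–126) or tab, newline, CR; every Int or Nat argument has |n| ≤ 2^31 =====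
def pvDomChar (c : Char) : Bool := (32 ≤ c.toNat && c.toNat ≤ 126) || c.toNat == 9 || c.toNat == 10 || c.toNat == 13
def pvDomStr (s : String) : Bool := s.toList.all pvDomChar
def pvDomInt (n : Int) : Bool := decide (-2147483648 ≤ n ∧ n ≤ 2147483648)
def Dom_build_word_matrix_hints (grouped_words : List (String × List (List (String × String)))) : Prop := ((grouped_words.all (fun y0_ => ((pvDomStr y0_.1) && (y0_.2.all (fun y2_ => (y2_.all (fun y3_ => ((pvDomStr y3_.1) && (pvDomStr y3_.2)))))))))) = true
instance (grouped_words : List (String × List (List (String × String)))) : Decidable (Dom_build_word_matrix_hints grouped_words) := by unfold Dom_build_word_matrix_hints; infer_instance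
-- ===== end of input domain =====

-- B is an alternative, equally costly decomposition: sort the flat prefix list and count runs,
-- instead of A's counting dict sorted at the end.  Return values agree on all of Pre_.

-- word["word"][:2].upper() — identical subexpression in both Pythons (a word is a dict[str,str])
def pvPrefix (word : List (String × String)) : String :=
  PySem.Str.upper (PySem.Str.slice ((PySem.Dict.ofList word).getD "word" "") none (some 2))

-- ===== PORT A =====
-- for item in grouped_words: … grouped_words[item] — iterating a dict's keys and looking each up
-- is folding over its (key, value) items (keys are unique).
def build_word_matrix_hints (grouped_words : List (String × List (List (String × String)))) : List (String × Int) :=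
  let matrix : PySem.Dict String Int :=
    (PySem.Dict.ofList grouped_words).items.foldl
      (fun m item =>
        item.2.foldl
          (fun m word =>
            let pfx := pvPrefix word
            m.insert pfx (m.getD pfx 0 + 1))
          m)
      PySem.Dict.empty
  PySem.List.sorted matrix.items (fun p => p.1) false

-- ===== PORT B =====
-- itertools.groupby on the sorted list + sum(1 for _ in g): one (key, run length) pair per run
def pvRunsAux (k : String) (c : Int) : List String → List (String × Int)
  | [] => [(k, c)]
  | y :: ys => if y = k then pvRunsAux k (c + 1) ys else (k, c) :: pvRunsAux y 1 ys

def pvRuns : List String → List (String × Int)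
  | [] => []
  | x :: xs => pvRunsAux x 1 xs

def build_word_matrix_hints_alt (grouped_words : List (String × List (List (String × String)))) : List (String × Int) :=
  let prefixes :=
    (PySem.Dict.ofList grouped_words).values.flatMap (fun words => words.map pvPrefix)
  pvRuns (PySem.List.sorted prefixes (fun x => x) false)

-- ===== PRECONDITION & SPEC =====
-- Pre_ excludes exactly the inputs on which Python A raises KeyError: some word dict without the key "word".
def Pre_build_word_matrix_hints (grouped_words : List (String × List (List (String × String)))) : Prop :=
  ∀ ws ∈ (PySem.Dict.ofList grouped_words).values, ∀ w ∈ ws, "word" ∈ w.map Prod.fst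
instance (grouped_words : List (String × List (List (String × String)))) : Decidable (Pre_build_word_matrix_hints grouped_words) := by unfold Pre_build_word_matrix_hints; infer_instance

def pvWitness_build_word_matrix_hints : (List (String × List (List (String × String)))) :=
  [("fruit", [[("word", "apple")], [("word", "Apricot")]]), ("other", [[("word", "b")]])]

def Spec_build_word_matrix_hints (grouped_words : List (String × List (List (String × String)))) (out : List (String × Int)) : Prop := out = build_word_matrix_hints_alt grouped_words
instance (grouped_words : List (String × List (List (String × String)))) (out : List (String × Int)) : Decidable (Spec_build_word_matrix_hints grouped_words out) := by unfold Spec_build_word_matrix_hints; infer_instance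

-- ===== CLAIM (what is proved, stated in full; the proofs are below) =====
def Claim_equal_build_word_matrix_hints : Prop := ∀ (grouped_words : List (String × List (List (String × String)))), Dom_build_word_matrix_hints grouped_words → Pre_build_word_matrix_hints grouped_words → Spec_build_word_matrix_hints grouped_words (build_word_matrix_hints grouped_words)

-- ===== LEMMAS AND PROOFS =====

-- every first component produced by pvRunsAux is the carried key or an element of the list
theorem pvRunsAux_fst_mem (ys : List String) (k : String) (c : Int) (p : String × Int)
    (hp : p ∈ pvRunsAux k c ys) : p.1 = k ∨ p.1 ∈ ys := by
  induction ys generalizing k c with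
  | nil => simp [pvRunsAux] at hp; simp [hp]
  | cons y ys ih =>
    simp only [pvRunsAux] at hp
    split at hp
    · rcases ih _ _ hp with h | h
      · exact Or.inl h
      · exact Or.inr (List.mem_cons_of_mem _ h)
    · rcases List.mem_cons.1 hp with h | h
      · exact Or.inl (by rw [h])
      · rcases ih _ _ h with h' | h'
        · exact Or.inr (by rw [h']; exact List.mem_cons_self)
        · exact Or.inr (List.mem_cons_of_mem _ h')

theorem pvRunsAux_pairwise (ys : List String) (k : String) (c : Int)
    (h1 : ys.Pairwise (· ≤ ·)) (h2 : ∀ y ∈ ys, k ≤ y) :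
    (pvRunsAux k c ys).Pairwise (fun a b => a.1 < b.1) := by
  induction ys generalizing k c with
  | nil => simp [pvRunsAux]
  | cons y ys ih =>
    rcases List.pairwise_cons.1 h1 with ⟨hy, hys⟩
    simp only [pvRunsAux]
    split
    · next heq =>
      subst heq
      exact ih _ _ hys hy
    · next hne =>
      have hky : k < y := lt_of_le_of_ne (h2 y (List.mem_cons_self)) (fun h => hne h.symm)
      refine List.pairwise_cons.2 ⟨?_, ih _ _ hys hy⟩
      intro q hq
      rcases pvRunsAux_fst_mem _ _ _ _ hq with h | h
      · simpa [h] using hky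
      · exact lt_of_lt_of_le hky (hy _ h)

theorem pvRunsAux_mem (ys : List String) (k : String) (c : Int)
    (h1 : ys.Pairwise (· ≤ ·)) (h2 : ∀ y ∈ ys, k ≤ y) (p : String × Int) :
    p ∈ pvRunsAux k c ys ↔
      (p.1 = k ∧ p.2 = c + ys.count k) ∨ (p.1 ∈ ys ∧ p.1 ≠ k ∧ p.2 = ys.count p.1) := by
  induction ys generalizing k c with
  | nil => simp [pvRunsAux, Prod.ext_iff]
  | cons y ys ih =>
    rcases List.pairwise_cons.1 h1 with ⟨hy, hys⟩
    simp only [pvRunsAux]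
    split
    · next heq =>
      subst heq
      rw [ih _ _ hys hy]
      constructor
      · rintro (⟨h1', h2'⟩ | ⟨h1', h2', h3'⟩)
        · left; refine ⟨h1', ?_⟩; rw [h2']; simp; ring
        · right
          refine ⟨List.mem_cons_of_mem _ h1', h2', ?_⟩
          rw [h3', List.count_cons]
          simp [Ne.symm h2']
      · rintro (⟨h1', h2'⟩ | ⟨h1', h2', h3'⟩)
        · left; refine ⟨h1', ?_⟩; rw [h2']; simp; ring
        · rcases List.mem_cons.1 h1' with h | h
          · exact absurd h h2'
          · right
            refine ⟨h, h2', ?_⟩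
            rw [h3', List.count_cons]
            simp [Ne.symm h2']
    · next hne =>
      have hky : k < y := lt_of_le_of_ne (h2 y (List.mem_cons_self)) (fun h => hne h.symm)
      have hknot : k ∉ ys := fun h => absurd (hy _ h) (not_le.2 hky)
      have hkcount : (y :: ys).count k = 0 := by
        simp [List.count_eq_zero.2 hknot, hne]
      rw [List.mem_cons, ih _ 1 hys hy]
      constructor
      · rintro (h | (⟨h1', h2'⟩ | ⟨h1', h2', h3'⟩))
        · left
          rw [h]
          simp [hkcount]
        · right
          refine ⟨by simp [h1'], by rw [h1']; exact Ne.symm (ne_of_lt hky), ?_⟩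
          rw [h1', h2', List.count_cons]
          simp; ring
        · right
          have hpy : y ≤ p.1 := hy _ h1'
          refine ⟨List.mem_cons_of_mem _ h1', fun h => absurd hpy (by rw [h]; exact not_le.2 hky), ?_⟩
          rw [h3', List.count_cons]
          simp [Ne.symm h2']
      · rintro (⟨h1', h2'⟩ | ⟨h1', h2', h3'⟩)
        · left
          have : p = (k, c) := by
            rcases p with ⟨p1, p2⟩
            simp only at h1' h2'
            rw [h1', h2', hkcount]
            simp
          exact this
        · rcases List.mem_cons.1 h1' with h | h
          · right; left
            refine ⟨h, ?_⟩
            rw [h3', h, List.count_cons]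
            simp; ring
          · by_cases hpy : p.1 = y
            · right; left
              refine ⟨hpy, ?_⟩
              rw [h3', hpy, List.count_cons]
              simp; ring
            · right; right
              refine ⟨h, hpy, ?_⟩
              rw [h3', List.count_cons]
              simp [Ne.symm hpy]

-- characterisation of pvRuns on a weakly sorted list
theorem pvRuns_mem (s : List String) (h1 : s.Pairwise (· ≤ ·)) (p : String × Int) :
    p ∈ pvRuns s ↔ p.1 ∈ s ∧ p.2 = s.count p.1 := by
  cases s with
  | nil => simp [pvRuns]
  | cons x t =>
    rcases List.pairwise_cons.1 h1 with ⟨hx, ht⟩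
    simp only [pvRuns]
    rw [pvRunsAux_mem t x 1 ht hx]
    constructor
    · rintro (⟨h1', h2'⟩ | ⟨h1', h2', h3'⟩)
      · refine ⟨by simp [h1'], ?_⟩
        rw [h1', h2', List.count_cons]
        simp; ring
      · refine ⟨List.mem_cons_of_mem _ h1', ?_⟩
        rw [h3', List.count_cons]
        simp [Ne.symm h2']
    · rintro ⟨h1', h2'⟩
      by_cases hpx : p.1 = x
      · left
        refine ⟨hpx, ?_⟩
        rw [h2', hpx, List.count_cons]
        simp; ring
      · right
        rcases List.mem_cons.1 h1' with h | h
        · exact absurd h hpx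
        · refine ⟨h, hpx, ?_⟩
          rw [h2', List.count_cons]
          simp [Ne.symm hpx]

theorem pvRuns_pairwise (s : List String) (h1 : s.Pairwise (· ≤ ·)) :
    (pvRuns s).Pairwise (fun a b => a.1 < b.1) := by
  cases s with
  | nil => simp [pvRuns]
  | cons x t =>
    rcases List.pairwise_cons.1 h1 with ⟨hx, ht⟩
    exact pvRunsAux_pairwise t x 1 ht hx

-- ===== VERDICT (by name: the statement is the Claim_ definition above) =====
theorem build_word_matrix_hints_spec : Claim_equal_build_word_matrix_hints := by
  intro gw _ _
  unfold Spec_build_word_matrix_hints build_word_matrix_hints build_word_matrix_hints_alt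
  set P : List String :=
    (PySem.Dict.ofList gw).values.flatMap (fun words => words.map pvPrefix) with hP
  -- A's nested counting loop is the counter of the flat prefix list
  have hmatrix :
      (PySem.Dict.ofList gw).items.foldl
        (fun m item =>
          item.2.foldl
            (fun m word =>
              let pfx := pvPrefix word
              m.insert pfx (m.getD pfx 0 + 1))
            m)
        PySem.Dict.empty = PySem.Dict.counter P := by
    rw [← PySem.Dict.foldl_insert_getD_add_one_eq_counter, hP, PySem.Dict.values,
      List.flatMap_map, List.foldl_flatMap]
    simp [List.foldl_map]
  rw [hmatrix]
  show PySem.List.sorted (PySem.Dict.counter P).items (fun p => p.1) false =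
    pvRuns (PySem.List.sorted P (fun x => x) false)
  rw [PySem.Dict.items_counter]
  -- B's run-length list of the sorted prefixes is the sorted counter items
  set s := PySem.List.sorted P (fun x => x) false with hs
  have hsp : s.Pairwise (· ≤ ·) := PySem.List.sorted_pairwise P (fun x => x)
  have hperm : (pvRuns s).Perm ((PySem.Set.ofList P).map (fun k => (k, (P.count k : Int)))) := by
    have hnd1 : (pvRuns s).Nodup :=
      (pvRuns_pairwise s hsp).imp (fun h => by intro he; rw [he] at h; exact lt_irrefl _ h)
    have hnd2 : ((PySem.Set.ofList P).map (fun k => (k, (P.count k : Int)))).Nodup :=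
      (PySem.Set.nodup_ofList P).map (fun a b hab => by
        simpa using congrArg Prod.fst hab)
    rw [List.perm_ext_iff_of_nodup hnd1 hnd2]
    intro p
    rw [pvRuns_mem s hsp p, List.mem_map]
    constructor
    · rintro ⟨h1', h2'⟩
      refine ⟨p.1, ?_, ?_⟩
      · rw [PySem.Set.mem_ofList]
        rw [hs] at h1'
        exact (PySem.List.mem_sorted P (fun x => x) false p.1).1 h1'
      · rcases p with ⟨p1, p2⟩
        simp only at h2' ⊢
        rw [h2', hs, ((PySem.List.sorted_perm P (fun x => x) false).count_eq p1)]
    · rintro ⟨k, hk, hkp⟩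
      rw [PySem.Set.mem_ofList] at hk
      rw [← hkp]
      refine ⟨?_, ?_⟩
      · rw [hs]
        exact (PySem.List.mem_sorted P (fun x => x) false k).2 hk
      · simp only
        rw [hs, ((PySem.List.sorted_perm P (fun x => x) false).count_eq k)]
  exact PySem.List.sorted_eq_of_perm_of_pairwise_lt _ _ (fun p => p.1) hperm (pvRuns_pairwise s hsp)
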